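-- pv_equiv track=rewrite | github.com/Fleaurent/AdventOfCode2021 | Day_10/my_script.py | completion_score
-- ===== SOURCE A (Python) =====
-- def completion_score(completion_string: str) -> int:
--     bracket_scores = {
--         ")": 1,
--         "]": 2,
--         "}": 3,
--         ">": 4
--     }
--     total_score = 0
--     for bracket in completion_string:
--         total_score = total_score*5 + bracket_scores[bracket]
--
--     return total_score
-- ===== SOURCE B (Python) =====
-- def completion_score(completion_string: str) -> int:
--     bracket_scores = {
--         ")": 1,
--         "]": 2,
--         "}": 3,
--         ">": 4
--     }
--     total = 0
--     power = 1
--     for bracket in reversed(completion_string):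
--         total += bracket_scores[bracket] * power
--         power *= 5
--     return total
-- ===== Notes on version B (the rewrite author's own statement) =====
-- stated objective: alternative
-- what changed: Replaces Horner folding (total = total*5 + score) with a positional base-5 weighted sum over the reversed string, maintaining an explicit power-of-5 weight.
import Mathlib
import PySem

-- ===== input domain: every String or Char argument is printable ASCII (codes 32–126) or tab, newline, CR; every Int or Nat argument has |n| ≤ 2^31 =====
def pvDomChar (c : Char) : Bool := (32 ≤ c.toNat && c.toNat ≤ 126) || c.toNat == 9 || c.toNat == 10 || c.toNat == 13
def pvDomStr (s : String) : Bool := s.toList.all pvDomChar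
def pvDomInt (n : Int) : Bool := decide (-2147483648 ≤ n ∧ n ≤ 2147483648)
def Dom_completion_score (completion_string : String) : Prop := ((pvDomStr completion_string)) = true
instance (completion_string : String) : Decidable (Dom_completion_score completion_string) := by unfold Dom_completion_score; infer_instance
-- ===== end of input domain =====

-- B computes the score as a positional base-5 weighted sum over the reversed string
-- instead of A's Horner fold; objective: alternative (same cost, different decomposition).
-- Pre_ excludes strings containing a character outside ")]}>", on which both Pythons raise KeyError.


-- ===== PORT A =====
-- bracket_scores lookup; the .getD 0 stands for Python's dict lookup, which raises
-- KeyError on other characters — exactly those inputs are excluded by Pre_ below.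
def pvBracketScores : PySem.Dict Char Int :=
  PySem.Dict.ofList [(')', 1), (']', 2), ('}', 3), ('>', 4)]

def completion_score (completion_string : String) : Int :=
  completion_string.toList.foldl
    (fun total_score bracket => total_score * 5 + (PySem.Dict.get? pvBracketScores bracket).getD 0) 0

-- ===== PORT B =====
def completion_score_alt (completion_string : String) : Int :=
  (completion_string.toList.reverse.foldl
    (fun (st : Int × Int) bracket =>
      (st.1 + (PySem.Dict.get? pvBracketScores bracket).getD 0 * st.2, st.2 * 5))
    (0, 1)).1

-- ===== PRECONDITION & SPEC =====
-- Pre_ excludes exactly the inputs where Python's dict lookup raises KeyError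
-- (a character other than ) ] } >); both A and B raise there.
def Pre_completion_score (completion_string : String) : Prop :=
  (completion_string.toList.all (fun c => c == ')' || c == ']' || c == '}' || c == '>')) = true
instance (completion_string : String) : Decidable (Pre_completion_score completion_string) := by
  unfold Pre_completion_score; infer_instance

def pvWitness_completion_score : String := ")"

def Spec_completion_score (completion_string : String) (out : Int) : Prop := out = completion_score_alt completion_string
instance (completion_string : String) (out : Int) : Decidable (Spec_completion_score completion_string out) := by unfold Spec_completion_score; infer_instance

-- ===== CLAIM (what is proved, stated in full; the proofs are below) =====
def Claim_equal_completion_score : Prop := ∀ (completion_string : String), Dom_completion_score completion_string → Pre_completion_score completion_string → Spec_completion_score completion_string (completion_score completion_string)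

-- ===== LEMMAS AND PROOFS =====
def pvV (c : Char) : Int := (PySem.Dict.get? pvBracketScores c).getD 0

def pvS : List Char → Int
  | [] => 0
  | c :: l => pvV c + 5 * pvS l

theorem pvB_fold (L : List Char) : ∀ (t p : Int),
    (L.foldl (fun (st : Int × Int) bracket => (st.1 + pvV bracket * st.2, st.2 * 5)) (t, p)).1
      = t + p * pvS L := by
  induction L with
  | nil => intro t p; simp [pvS]
  | cons c L ih =>
      intro t p
      simp only [List.foldl_cons, pvS, ih]
      ring

theorem pvS_append (L : List Char) (x : Char) :
    pvS (L ++ [x]) = pvS L + 5 ^ L.length * pvV x := by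
  induction L with
  | nil => simp [pvS]
  | cons c L ih => simp [pvS, ih]; ring

theorem pvA_fold (l : List Char) : ∀ (a : Int),
    l.foldl (fun total_score bracket => total_score * 5 + pvV bracket) a
      = a * 5 ^ l.length + pvS l.reverse := by
  induction l with
  | nil => intro a; simp [pvS]
  | cons x xs ih =>
      intro a
      simp only [List.foldl_cons, List.reverse_cons, ih, pvS_append,
        List.length_cons, List.length_reverse]
      ring

-- ===== VERDICT (by name: the statement is the Claim_ definition above) =====
theorem completion_score_spec : Claim_equal_completion_score := by
  intro s _ _
  show completion_score s = completion_score_alt s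
  unfold completion_score completion_score_alt
  have hA := pvA_fold s.toList 0
  have hB := pvB_fold s.toList.reverse 0 1
  simp only [pvV] at hA hB
  rw [hA, hB]
  ring
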